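-- pv_equiv track=rewrite | github.com/pypi-data/pypi-mirror-403 | packages/temet/temet-0.9.0.tar.gz/temet-0.9.0/docs/conf.py | math_latex
-- ===== SOURCE A (Python) =====
-- def math_latex(label):
--     """Convert $-based latex into rest :math: syntax."""
--     label_math = ""
--     state = 0
--
--     for s in label:
--         if s == "$":
--             if state % 2 == 0:
--                 label_math += " :math:`"
--             else:
--                 label_math += "` "
--             state += 1
--         else:
--             label_math += s
--
--     assert state % 2 == 0, "Unmatched $ in label: %s" % label
--
--     return label_math.strip()
-- ===== SOURCE B (Python) =====
-- def math_latex(label):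
--     """Convert $-based latex into rest :math: syntax."""
--     parts = label.split("$")
--     assert len(parts) % 2 == 1, "Unmatched $ in label: %s" % label
--     pieces = []
--     for i, part in enumerate(parts):
--         pieces.append(part if i % 2 == 0 else " :math:`" + part + "` ")
--     return "".join(pieces).strip()
-- ===== Notes on version B (the rewrite author's own statement) =====
-- stated objective: faster
-- what changed: Replaces the character-by-character parity state machine (per-char string concatenation) by a single split on '$' with odd-indexed parts wrapped, joined and stripped.
import Mathlib
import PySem

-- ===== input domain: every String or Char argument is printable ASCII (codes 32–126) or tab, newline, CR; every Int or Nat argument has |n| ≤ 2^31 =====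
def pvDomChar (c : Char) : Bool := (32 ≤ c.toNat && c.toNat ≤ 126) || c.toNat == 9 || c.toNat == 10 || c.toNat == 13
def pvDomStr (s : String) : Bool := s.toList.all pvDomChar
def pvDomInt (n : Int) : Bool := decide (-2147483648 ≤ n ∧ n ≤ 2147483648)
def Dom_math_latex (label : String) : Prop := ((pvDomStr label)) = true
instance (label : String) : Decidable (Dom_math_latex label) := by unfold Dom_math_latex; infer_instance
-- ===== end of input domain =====

-- B replaces A's character-by-character parity state machine by split-on-'$' + wrap odd parts (measured faster: split/join do the work in bulk instead of per-char concatenation).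


-- ===== PORT A =====
-- literal port of A: one pass over the characters, accumulating the output and a '$'-parity counter,
-- then .strip(); the 'assert state % 2 == 0' is exactly Pre_math_latex below.
def math_latex (label : String) : String :=
  String.ofList (PySem.Chars.strip
    (label.toList.foldl
      (fun (st : List Char × Int) s =>
        if s = '$' then
          (st.1 ++ (if PySem.Int.mod st.2 2 = 0 then " :math:`".toList else "` ".toList), st.2 + 1)
        else
          (st.1 ++ [s], st.2))
      ([], 0)).1)

-- ===== PORT B =====
-- literal port of Source B: split on '$', wrap odd-indexed parts, join, strip.
def math_latex_alt (label : String) : String :=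
  String.ofList (PySem.Chars.strip (PySem.Chars.join []
    ((PySem.List.enumerate (PySem.Chars.splitOn label.toList ['$'])).foldl
      (fun (acc : List (List Char)) ip =>
        acc ++ [if PySem.Int.mod ip.1 2 = 0 then ip.2 else " :math:`".toList ++ ip.2 ++ "` ".toList])
      [])))

-- ===== PRECONDITION & SPEC =====
-- A's assert fails (AssertionError "Unmatched $ in label: …") exactly when the number of '$' is odd; excluded.
def Pre_math_latex (label : String) : Prop := label.toList.count '$' % 2 = 0
instance (label : String) : Decidable (Pre_math_latex label) := by unfold Pre_math_latex; infer_instance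
def pvWitness_math_latex : String := "a $x$ b"

def Spec_math_latex (label : String) (out : String) : Prop := out = math_latex_alt label
instance (label : String) (out : String) : Decidable (Spec_math_latex label out) := by unfold Spec_math_latex; infer_instance

-- ===== CLAIM (what is proved, stated in full; the proofs are below) =====
def Claim_equal_math_latex : Prop := ∀ (label : String), Dom_math_latex label → Pre_math_latex label → Spec_math_latex label (math_latex label)

-- ===== LEMMAS AND PROOFS =====

-- structural characterisation of Python's split on the single character '$'
def splitDollar : List Char → List (List Char)
  | [] => [[]]
  | c :: cs =>
    if c = '$' then [] :: splitDollar cs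
    else
      match splitDollar cs with
      | [] => [[c]]
      | p :: ps => (c :: p) :: ps

-- what A's loop produces, as a function of the remaining chars and the parity flag (true = next '$' opens)
def aglue : List Char → Bool → List Char
  | [], _ => []
  | c :: cs, b =>
    if c = '$' then (if b then " :math:`".toList else "` ".toList) ++ aglue cs (!b)
    else c :: aglue cs b

-- the same text, organised around the split parts with alternating boundary markers
def mglue : List (List Char) → Bool → List Char
  | [], _ => []
  | p :: rest, b =>
    p ++ (if rest.isEmpty then [] else (if b then " :math:`".toList else "` ".toList)) ++ mglue rest (!b)

-- what B's loop produces: parts with odd (Int) index wrapped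
def bglue : List (List Char) → Int → List Char
  | [], _ => []
  | p :: rest, i =>
    (if PySem.Int.mod i 2 = 0 then p else " :math:`".toList ++ p ++ "` ".toList) ++ bglue rest (i + 1)

theorem splitDollar_ne_nil (cs : List Char) : splitDollar cs ≠ [] := by
  cases cs with
  | nil => simp [splitDollar]
  | cons c cs =>
    simp only [splitDollar]
    split
    · simp
    · cases h : splitDollar cs <;> simp

theorem splitOn_go_eq (fuel : Nat) (l cur : List Char) (acc : List (List Char))
    (h : l.length ≤ fuel) :
    PySem.Chars.splitOn.go ['$'] fuel l cur acc =
      acc.reverse ++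
        (match splitDollar l with
         | [] => []
         | p :: ps => (cur.reverse ++ p) :: ps) := by
  induction fuel generalizing l cur acc with
  | zero =>
    have : l = [] := by cases l <;> simp_all
    subst this
    simp [PySem.Chars.splitOn.go, splitDollar]
  | succ fuel ih =>
    cases l with
    | nil => simp [PySem.Chars.splitOn.go, splitDollar]
    | cons c rest =>
      simp only [PySem.Chars.splitOn.go]
      by_cases hc : c = '$'
      · subst hc
        rw [if_pos (by simp [List.isPrefixOf])]
        simp only [List.length_cons, List.drop_succ_cons, List.length_nil, List.drop_zero]
        rw [ih rest [] (List.reverse cur :: acc) (by simpa using Nat.le_of_succ_le_succ (by simpa using h))]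
        simp [splitDollar]
        cases hs : splitDollar rest with
        | nil => exact absurd hs (splitDollar_ne_nil rest)
        | cons p ps => simp
      · rw [if_neg (by simp [List.isPrefixOf]; exact fun h => hc h.symm)]
        rw [ih rest (c :: cur) acc (by simpa using Nat.le_of_succ_le_succ (by simpa using h))]
        simp only [splitDollar, if_neg hc]
        cases hs : splitDollar rest with
        | nil => exact absurd hs (splitDollar_ne_nil rest)
        | cons p ps => simp

theorem splitOn_eq_splitDollar (cs : List Char) :
    PySem.Chars.splitOn cs ['$'] = splitDollar cs := by
  unfold PySem.Chars.splitOn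
  rw [splitOn_go_eq cs.length.succ cs [] [] (Nat.le_succ _)]
  cases hs : splitDollar cs with
  | nil => exact absurd hs (splitDollar_ne_nil cs)
  | cons p ps => simp

theorem mod_succ_flip (st : Int) :
    (PySem.Int.mod (st + 1) 2 = 0) ↔ ¬ (PySem.Int.mod st 2 = 0) := by
  rw [PySem.Int.mod_eq_emod_of_pos (by norm_num), PySem.Int.mod_eq_emod_of_pos (by norm_num)]
  omega

theorem foldA_eq_aglue (cs : List Char) (acc : List Char) (st : Int) :
    (cs.foldl
      (fun (p : List Char × Int) s =>
        if s = '$' then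
          (p.1 ++ (if PySem.Int.mod p.2 2 = 0 then " :math:`".toList else "` ".toList), p.2 + 1)
        else
          (p.1 ++ [s], p.2))
      (acc, st)).1 = acc ++ aglue cs (decide (PySem.Int.mod st 2 = 0)) := by
  induction cs generalizing acc st with
  | nil => simp [aglue]
  | cons c cs ih =>
    simp only [List.foldl_cons]
    by_cases hc : c = '$'
    · subst hc
      rw [if_pos rfl]
      rw [ih]
      have hflip : decide (PySem.Int.mod (st + 1) 2 = 0) = ! decide (PySem.Int.mod st 2 = 0) := by
        by_cases h : PySem.Int.mod st 2 = 0
        · simp only [h, decide_true, Bool.not_true, decide_eq_false_iff_not]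
          exact fun hh => ((mod_succ_flip st).1 hh) h
        · simp only [h, decide_false, Bool.not_false, decide_eq_true_eq]
          exact (mod_succ_flip st).2 h
      rw [hflip]
      simp only [aglue]
      by_cases h : PySem.Int.mod st 2 = 0 <;> simp
    · rw [if_neg hc, ih]
      simp [aglue, hc]

theorem aglue_eq_mglue (cs : List Char) (b : Bool) :
    aglue cs b = mglue (splitDollar cs) b := by
  induction cs generalizing b with
  | nil => simp [aglue, splitDollar, mglue]
  | cons c cs ih =>
    by_cases hc : c = '$'
    · subst hc
      have hne := splitDollar_ne_nil cs
      cases hs : splitDollar cs with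
      | nil => exact absurd hs hne
      | cons p ps =>
        simp only [aglue, splitDollar]
        rw [ih, hs]
        simp [mglue]
    · simp only [aglue, splitDollar, if_neg hc]
      have hne := splitDollar_ne_nil cs
      cases hs : splitDollar cs with
      | nil => exact absurd hs hne
      | cons p ps =>
        simp only [mglue]
        rw [ih, hs]
        simp [mglue]

theorem pairL : ∀ (rest : List (List Char)), rest.length % 2 = 0 → ∀ (i : Int), PySem.Int.mod i 2 = 1 →
    (if rest.isEmpty then ([] : List Char) else " :math:`".toList) ++ mglue rest false = bglue rest i := by
  intro rest
  match rest with
  | [] => intro _ i _; simp [mglue, bglue]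
  | [q] => intro h; simp at h
  | q :: r :: rest' =>
    intro h i hi
    have hrest' : rest'.length % 2 = 0 := by simp at h; omega
    have hmodi : PySem.Int.mod i 2 ≠ 0 := by rw [hi]; norm_num
    have hmodi1 : PySem.Int.mod (i + 1) 2 = 0 := by
      rw [PySem.Int.mod_eq_emod_of_pos (by norm_num)]
      rw [PySem.Int.mod_eq_emod_of_pos (by norm_num)] at hi
      omega
    have hmodi2 : PySem.Int.mod (i + 1 + 1) 2 = 1 := by
      rw [PySem.Int.mod_eq_emod_of_pos (by norm_num)]
      rw [PySem.Int.mod_eq_emod_of_pos (by norm_num)] at hi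
      omega
    have ih := pairL rest' hrest' (i + 1 + 1) hmodi2
    simp only [mglue, bglue, List.isEmpty_cons, if_false, Bool.false_eq_true, if_neg hmodi,
      if_pos hmodi1]
    rw [← ih]
    by_cases he : rest'.isEmpty <;> simp [he]

theorem join_nil_eq_flatten (l : List (List Char)) : PySem.Chars.join [] l = l.flatten := by
  induction l with
  | nil => rfl
  | cons p rest ih =>
    cases rest with
    | nil => simp [PySem.Chars.join, List.intercalate, List.intersperse]
    | cons q r =>
      simp only [PySem.Chars.join, List.intercalate, List.intersperse] at *
      simp_all

theorem foldB_eq_bglue (parts : List (List Char)) (i : Int) (acc : List (List Char)) :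
    PySem.Chars.join []
      ((PySem.List.enumerate parts i).foldl
        (fun (acc : List (List Char)) ip =>
          acc ++ [if PySem.Int.mod ip.1 2 = 0 then ip.2 else " :math:`".toList ++ ip.2 ++ "` ".toList])
        acc) = PySem.Chars.join [] acc ++ bglue parts i := by
  induction parts generalizing i acc with
  | nil => simp [PySem.List.enumerate, bglue]
  | cons p rest ih =>
    rw [PySem.List.enumerate_cons]
    simp only [List.foldl_cons]
    rw [ih]
    simp [join_nil_eq_flatten, bglue]

theorem splitDollar_length (cs : List Char) :
    (splitDollar cs).length = cs.count '$' + 1 := by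
  induction cs with
  | nil => simp [splitDollar]
  | cons c cs ih =>
    by_cases hc : c = '$'
    · subst hc; simp [splitDollar, ih]
    · simp only [splitDollar, if_neg hc]
      cases hs : splitDollar cs with
      | nil => exact absurd hs (splitDollar_ne_nil cs)
      | cons p ps =>
        rw [hs] at ih
        simp_all

theorem mglue_eq_bglue (parts : List (List Char)) (h : parts.length % 2 = 1) :
    mglue parts true = bglue parts 0 := by
  cases parts with
  | nil => simp at h
  | cons p rest =>
    have hrest : rest.length % 2 = 0 := by simp at h; omega
    have hb := pairL rest hrest 1 (by decide)
    simp only [mglue, bglue, Bool.not_true, zero_add, List.append_assoc]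
    rw [if_pos (show PySem.Int.mod 0 2 = 0 from by decide), ← hb]
    by_cases he : rest.isEmpty <;> simp [he]

-- ===== VERDICT (by name: the statement is the Claim_ definition above) =====
theorem math_latex_spec : Claim_equal_math_latex := by
  intro label _ hpre
  unfold Spec_math_latex math_latex math_latex_alt
  rw [foldA_eq_aglue]
  simp only [show decide (PySem.Int.mod 0 2 = 0) = true by decide]
  rw [aglue_eq_mglue, splitOn_eq_splitDollar, foldB_eq_bglue]
  rw [mglue_eq_bglue _ (by
    rw [splitDollar_length]
    unfold Pre_math_latex at hpre
    omega)]
  simp [PySem.Chars.join, List.intercalate]
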